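-- pv_equiv track=rewrite | github.com/Yang-Heewon/gnn-trm | trm_unified/train_core.py | _build_rel_to_nodes
-- ===== SOURCE A (Python) =====
-- def _build_rel_to_nodes(edges):
--     rel_to_nodes = {}
--     rel_seen = {}
--     for r, n in edges:
--         rr = int(r)
--         nn = int(n)
--         if rr not in rel_to_nodes:
--             rel_to_nodes[rr] = []
--             rel_seen[rr] = set()
--         if nn not in rel_seen[rr]:
--             rel_seen[rr].add(nn)
--             rel_to_nodes[rr].append(nn)
--     return rel_to_nodes
-- ===== SOURCE B (Python) =====
-- def _build_rel_to_nodes(edges):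
--     result = {}
--     for r, _ in edges:
--         rr = int(r)
--         if rr in result:
--             continue
--         ns = []
--         for r2, n2 in edges:
--             if int(r2) == rr:
--                 nn = int(n2)
--                 if nn not in ns:
--                     ns.append(nn)
--         result[rr] = ns
--     return result
-- ===== Notes on version B (the rewrite author's own statement) =====
-- stated objective: alternative
-- what changed: Replaces A's single pass with parallel per-relation seen-sets by a nested-scan algorithm: for each edge whose relation is not yet a result key, rescan the whole edge list and collect that relation's distinct nodes in order in one list, so no grouping dict of lists plus dict of sets is ever maintained incrementally.
import Mathlib
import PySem

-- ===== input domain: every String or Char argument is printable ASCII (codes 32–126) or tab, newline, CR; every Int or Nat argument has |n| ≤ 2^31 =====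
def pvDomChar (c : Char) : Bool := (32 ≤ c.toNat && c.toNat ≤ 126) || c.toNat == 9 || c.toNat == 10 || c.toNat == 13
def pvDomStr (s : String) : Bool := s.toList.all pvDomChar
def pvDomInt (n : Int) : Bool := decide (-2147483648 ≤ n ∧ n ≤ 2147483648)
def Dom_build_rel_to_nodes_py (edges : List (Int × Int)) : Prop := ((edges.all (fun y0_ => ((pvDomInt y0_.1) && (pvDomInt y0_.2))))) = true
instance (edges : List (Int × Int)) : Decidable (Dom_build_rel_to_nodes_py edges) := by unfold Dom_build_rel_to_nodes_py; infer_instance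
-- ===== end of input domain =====

-- B replaces A's single-pass build (grouping dict plus a parallel per-relation 'seen' set) by a
-- nested-scan algorithm: for each not-yet-seen relation, rescan all edges to collect its distinct
-- nodes in order; objective: alternative (not faster).


-- ===== PORT A =====
-- one loop iteration of A: ensure rr is a key of both dicts, then append nn unless already seen
def buildRelStepA (st : PySem.Dict Int (List Int) × PySem.Dict Int (PySem.Set Int)) (e : Int × Int) :
    PySem.Dict Int (List Int) × PySem.Dict Int (PySem.Set Int) :=
  let rr := e.1        -- int(r) on an int is the identity
  let nn := e.2        -- int(n) on an int is the identity
  let st2 := if st.1.contains rr then st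
             else (st.1.insert rr [], st.2.insert rr PySem.Set.empty)
  if PySem.Set.contains (st2.2.getD rr PySem.Set.empty) nn then st2
  else (st2.1.modify rr [] (fun l => l ++ [nn]),
        st2.2.modify rr PySem.Set.empty (fun s => PySem.Set.add s nn))

def build_rel_to_nodes_py (edges : List (Int × Int)) : List (Int × List Int) :=
  (edges.foldl buildRelStepA (PySem.Dict.empty, PySem.Dict.empty)).1.items

-- ===== PORT B =====
-- outer loop over edges: skip relations already in result, else collect that relation's distinct
-- nodes by a full inner rescan of edges
def build_rel_to_nodes_py_alt (edges : List (Int × Int)) : List (Int × List Int) :=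
  (edges.foldl (fun res e =>
      if res.contains e.1 then res                    -- int(r) on an int is the identity
      else res.insert e.1
        (edges.foldl (fun ns p =>
            if p.1 == e.1 then (if ns.contains p.2 then ns else ns ++ [p.2]) else ns) []))
    PySem.Dict.empty).items

-- ===== PRECONDITION & SPEC =====
def Spec_build_rel_to_nodes_py (edges : List (Int × Int)) (out : List (Int × List Int)) : Prop := out = build_rel_to_nodes_py_alt edges
instance (edges : List (Int × Int)) (out : List (Int × List Int)) : Decidable (Spec_build_rel_to_nodes_py edges out) := by unfold Spec_build_rel_to_nodes_py; infer_instance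

-- ===== CLAIM (what is proved, stated in full; the proofs are below) =====
def Claim_equal_build_rel_to_nodes_py : Prop := ∀ (edges : List (Int × Int)), Dom_build_rel_to_nodes_py edges → Spec_build_rel_to_nodes_py edges (build_rel_to_nodes_py edges)

-- ===== LEMMAS AND PROOFS =====

-- the relations of es, first occurrences in order
def relsOf (es : List (Int × Int)) : List Int := PySem.List.dedup (es.map Prod.fst)
-- the distinct nodes of relation r in es, first occurrences in order
def nodesOf (es : List (Int × Int)) (r : Int) : List Int :=
  PySem.List.dedup ((es.filter (fun p => p.1 == r)).map Prod.snd)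
-- the common final association list
def grpOf (es : List (Int × Int)) : List (Int × List Int) :=
  (relsOf es).map (fun r => (r, nodesOf es r))

lemma dedup_snoc (l : List Int) (x : Int) :
    PySem.List.dedup (l ++ [x]) = if x ∈ l then PySem.List.dedup l else PySem.List.dedup l ++ [x] := by
  have h : PySem.List.dedup (l ++ [x]) = PySem.Set.add (PySem.List.dedup l) x := by
    simp [PySem.List.dedup, PySem.Set.ofList_eq_foldl, List.foldl_append, PySem.Set.add]
  rw [h]
  by_cases hx : x ∈ l
  · simp [PySem.Set.add, PySem.Set.contains, hx]
  · simp [PySem.Set.add, PySem.Set.contains, hx]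

lemma relsOf_snoc (es : List (Int × Int)) (r n : Int) :
    relsOf (es ++ [(r, n)]) = if r ∈ es.map Prod.fst then relsOf es else relsOf es ++ [r] := by
  unfold relsOf
  rw [List.map_append, List.map_singleton, dedup_snoc]

lemma nodesOf_snoc_ne (es : List (Int × Int)) (r n r' : Int) (h : r' ≠ r) :
    nodesOf (es ++ [(r, n)]) r' = nodesOf es r' := by
  have : List.filter (fun p : Int × Int => p.1 == r') [(r, n)] = [] := by
    simp [show ¬ r = r' from fun hh => h hh.symm]
  simp [nodesOf, List.filter_append, this]

lemma nodesOf_snoc_self (es : List (Int × Int)) (r n : Int) :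
    nodesOf (es ++ [(r, n)]) r = if n ∈ nodesOf es r then nodesOf es r else nodesOf es r ++ [n] := by
  have : n ∈ nodesOf es r ↔ n ∈ (es.filter (fun p => p.1 == r)).map Prod.snd := by
    simp [nodesOf]
  show PySem.List.dedup _ = _
  rw [List.filter_append, show List.filter (fun p : Int × Int => p.1 == r) [(r, n)] = [(r, n)] by simp,
      List.map_append, List.map_singleton, dedup_snoc]
  by_cases hn : n ∈ nodesOf es r
  · rw [if_pos (this.mp hn), if_pos hn]; rfl
  · rw [if_neg (fun hc => hn (this.mpr hc)), if_neg hn]; rfl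

lemma mem_relsOf (es : List (Int × Int)) (r : Int) : r ∈ relsOf es ↔ r ∈ es.map Prod.fst := by
  simp [relsOf]

lemma keys_mkG (es : List (Int × Int)) : (PySem.Dict.mk (grpOf es)).keys = relsOf es := by
  simp [grpOf, Function.comp_def]

lemma nodup_relsOf (es : List (Int × Int)) : (relsOf es).Nodup := PySem.List.nodup_dedup _

lemma getD_mkG (es : List (Int × Int)) (r : Int) (hr : r ∈ relsOf es) (d0 : List Int) :
    (PySem.Dict.mk (grpOf es)).getD r d0 = nodesOf es r := by
  refine PySem.Dict.getD_of_mem_items _ ?_ ?_ d0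
  · exact List.mem_map.2 ⟨r, hr, rfl⟩
  · rw [keys_mkG]; exact nodup_relsOf es

lemma contains_mkG (es : List (Int × Int)) (r : Int) :
    (PySem.Dict.mk (grpOf es)).contains r = decide (r ∈ relsOf es) := by
  rw [PySem.Dict.contains_eq_decide_mem_keys, keys_mkG]

lemma nodesOf_fresh (es : List (Int × Int)) (r : Int) (hr : r ∉ es.map Prod.fst) : nodesOf es r = [] := by
  have h : es.filter (fun p => p.1 == r) = [] := by
    refine List.filter_eq_nil_iff.2 (fun p hp => ?_)
    simp only [beq_iff_eq]
    exact fun hpr => hr (List.mem_map.2 ⟨p, hp, hpr⟩)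
  simp [nodesOf, h]

lemma grpOf_snoc_seen (es : List (Int × Int)) (r n : Int) (hr : r ∈ es.map Prod.fst)
    (hn : n ∈ nodesOf es r) : grpOf (es ++ [(r, n)]) = grpOf es := by
  unfold grpOf
  rw [relsOf_snoc, if_pos hr]
  refine List.map_congr_left (fun r' _ => ?_)
  by_cases h : r' = r
  · subst h; rw [nodesOf_snoc_self, if_pos hn]
  · rw [nodesOf_snoc_ne es r n r' h]

lemma grpOf_snoc_new_node (es : List (Int × Int)) (r n : Int) (hr : r ∈ es.map Prod.fst)
    (hn : n ∉ nodesOf es r) :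
    grpOf (es ++ [(r, n)])
      = (grpOf es).map (fun p => if p.1 == r then (r, nodesOf es r ++ [n]) else p) := by
  unfold grpOf
  rw [relsOf_snoc, if_pos hr, List.map_map]
  refine List.map_congr_left (fun r' _ => ?_)
  by_cases h : r' = r
  · subst h; simp [nodesOf_snoc_self, if_neg hn]
  · simp [h, nodesOf_snoc_ne es r n r' h]

lemma grpOf_snoc_fresh (es : List (Int × Int)) (r n : Int) (hr : r ∉ es.map Prod.fst) :
    grpOf (es ++ [(r, n)]) = grpOf es ++ [(r, [n])] := by
  unfold grpOf
  rw [relsOf_snoc, if_neg hr, List.map_append]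
  congr 1
  · refine List.map_congr_left (fun r' hmem => ?_)
    have h : r' ≠ r := fun hh => hr ((mem_relsOf es r).1 (hh ▸ hmem))
    rw [nodesOf_snoc_ne es r n r' h]
  · simp [nodesOf_snoc_self, nodesOf_fresh es r hr]

lemma foldA (es : List (Int × Int)) :
    es.foldl buildRelStepA (PySem.Dict.empty, PySem.Dict.empty)
      = (PySem.Dict.mk (grpOf es), PySem.Dict.mk (grpOf es)) := by
  induction es using List.reverseRecOn with
  | nil => rfl
  | append_singleton es e ih =>
    obtain ⟨r, n⟩ := e
    rw [List.foldl_append, ih, List.foldl_cons, List.foldl_nil]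
    by_cases hr : r ∈ es.map Prod.fst
    · have hrr : r ∈ relsOf es := (mem_relsOf es r).2 hr
      have hcont : (PySem.Dict.mk (grpOf es)).contains r = true := by
        rw [contains_mkG]; simpa using hrr
      by_cases hn : n ∈ nodesOf es r
      · simp only [buildRelStepA, hcont, if_true,
                   getD_mkG es r hrr]
        rw [if_pos (by simp [PySem.Set.contains, hn])]
        rw [grpOf_snoc_seen es r n hr hn]
      · simp only [buildRelStepA, hcont, if_true, getD_mkG es r hrr]
        rw [if_neg (by simp [PySem.Set.contains, hn])]
        simp only [PySem.Dict.modify, getD_mkG es r hrr]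
        have hadd : PySem.Set.add (nodesOf es r) n = nodesOf es r ++ [n] := by
          simp [PySem.Set.add, PySem.Set.contains, hn]
        rw [hadd]
        refine Prod.ext ?_ ?_ <;>
          · apply PySem.Dict.ext
            rw [PySem.Dict.items_insert_of_contains _ _ hcont]
            rw [grpOf_snoc_new_node es r n hr hn]
    · have hcont : (PySem.Dict.mk (grpOf es)).contains r = false := by
        rw [contains_mkG]; simp [mem_relsOf, hr]
      simp only [buildRelStepA, hcont, Bool.false_eq_true, if_false]
      rw [if_neg (by simp [PySem.Dict.getD_insert_self, PySem.Set.contains, PySem.Set.empty])]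
      simp only [PySem.Dict.modify, PySem.Dict.getD_insert_self]
      rw [List.nil_append, show PySem.Set.add PySem.Set.empty n = ([n] : List Int) from rfl,
          PySem.Dict.insert_insert_self, PySem.Dict.insert_insert_self]
      refine Prod.ext ?_ ?_ <;>
        · apply PySem.Dict.ext
          rw [PySem.Dict.items_insert_of_not_contains _ _ hcont]
          rw [grpOf_snoc_fresh es r n hr]

-- ===== B-side lemmas =====

-- B's inner rescan computes nodesOf
lemma innerB_general (r : Int) (es : List (Int × Int)) : ∀ (ns : List Int),
    es.foldl (fun ns p => if p.1 == r then (if ns.contains p.2 then ns else ns ++ [p.2]) else ns) ns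
      = List.foldl PySem.Set.add ns ((es.filter (fun p => p.1 == r)).map Prod.snd) := by
  induction es with
  | nil => intro ns; rfl
  | cons e es ih =>
    intro ns
    by_cases h : e.1 = r
    · simp only [List.foldl_cons, List.filter_cons, h, beq_self_eq_true, if_true, List.map_cons,
                 List.foldl_cons]
      rw [ih]
      congr 1
    · simp only [List.foldl_cons, List.filter_cons, show (e.1 == r) = false by simpa using h,
                 Bool.false_eq_true, if_false]
      exact ih ns

lemma innerB (r : Int) (es : List (Int × Int)) :
    es.foldl (fun ns p => if p.1 == r then (if ns.contains p.2 then ns else ns ++ [p.2]) else ns) []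
      = nodesOf es r := by
  rw [innerB_general, nodesOf]
  simp [PySem.Set.ofList_eq_foldl]

lemma dedup_append_mem (a : List Int) (x : Int) (b : List Int) (hx : x ∈ a) :
    PySem.List.dedup (a ++ x :: b) = PySem.List.dedup (a ++ b) := by
  have hmem : x ∈ List.foldl PySem.Set.add [] a := by
    have := (PySem.Set.mem_ofList a x).2 hx
    rwa [PySem.Set.ofList_eq_foldl] at this
  simp only [PySem.List.dedup, PySem.Set.ofList_eq_foldl,
             List.foldl_append, List.foldl_cons]
  congr 1
  simp [PySem.Set.add, PySem.Set.contains, hmem]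

lemma dedup_nodup (l : List Int) (h : l.Nodup) : PySem.List.dedup l = l := by
  induction l using List.reverseRecOn with
  | nil => rfl
  | append_singleton l x ih =>
    have hx : x ∉ l := fun hm => (List.nodup_append.1 h).2.2 x hm x (by simp) rfl
    rw [dedup_snoc, if_neg hx, ih (List.nodup_append.1 h).1]

-- invariant of B's outer loop: after processing any list of edges starting from a dict whose
-- items are rs.map (r ↦ (r, nodesOf edges r)) with rs nodup, the items are the dedup'd key list
lemma outerB (edges : List (Int × Int)) : ∀ (es : List (Int × Int)) (d : PySem.Dict Int (List Int))
    (rs : List Int), d.items = rs.map (fun r => (r, nodesOf edges r)) → rs.Nodup →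
    (es.foldl (fun res e =>
        if res.contains e.1 then res
        else res.insert e.1
          (edges.foldl (fun ns p =>
              if p.1 == e.1 then (if ns.contains p.2 then ns else ns ++ [p.2]) else ns) [])) d).items
      = (PySem.List.dedup (rs ++ es.map Prod.fst)).map (fun r => (r, nodesOf edges r)) := by
  intro es
  induction es with
  | nil =>
    intro d rs hd hn
    rw [List.foldl_nil, List.map_nil, List.append_nil, dedup_nodup rs hn]
    exact hd
  | cons e es ih =>
    intro d rs hd hn
    simp only [List.map_cons, List.foldl_cons]
    have hkeys : d.keys = rs := by
      show d.items.map Prod.fst = rs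
      rw [hd, List.map_map]
      simp [Function.comp_def]
    have hcont : d.contains e.1 = decide (e.1 ∈ rs) := by
      rw [PySem.Dict.contains_eq_decide_mem_keys, hkeys]
    by_cases hr : e.1 ∈ rs
    · rw [if_pos (by rw [hcont]; exact decide_eq_true hr)]
      rw [ih d rs hd hn, dedup_append_mem rs e.1 (es.map Prod.fst) hr]
    · have hcf : d.contains e.1 = false := by rw [hcont]; exact decide_eq_false hr
      rw [if_neg (by simp [hcf])]
      have hd' : (d.insert e.1
          (edges.foldl (fun ns p =>
              if p.1 == e.1 then (if ns.contains p.2 then ns else ns ++ [p.2]) else ns) [])).items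
          = (rs ++ [e.1]).map (fun r => (r, nodesOf edges r)) := by
        rw [PySem.Dict.items_insert_of_not_contains _ _ hcf, hd, innerB, List.map_append,
            List.map_singleton]
      have hn' : (rs ++ [e.1]).Nodup := by
        have hdisj : ∀ a ∈ rs, ∀ b ∈ [e.1], a ≠ b := by
          intro a ha b hb heq
          simp only [List.mem_singleton] at hb
          exact hr ((heq.trans hb) ▸ ha)
        exact List.nodup_append.2 ⟨hn, List.nodup_singleton _, hdisj⟩
      rw [ih _ (rs ++ [e.1]) hd' hn', List.append_assoc, List.singleton_append]

lemma altSpec (es : List (Int × Int)) : build_rel_to_nodes_py_alt es = grpOf es := by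
  show (es.foldl _ PySem.Dict.empty).items = _
  rw [outerB es es PySem.Dict.empty [] rfl List.nodup_nil]
  rfl

-- ===== VERDICT (by name: the statement is the Claim_ definition above) =====
theorem build_rel_to_nodes_py_spec : Claim_equal_build_rel_to_nodes_py := by
  intro edges _
  show _ = _
  rw [build_rel_to_nodes_py, foldA, altSpec]
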